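-- pv_equiv track=rewrite | github.com/patwadeepak/data-structures-and-algorithms | leetcode/BiWeekly Contest 168/B- 3723. Maximize Sum of Squares of Digits.py | maxSumOfSquares
-- ===== SOURCE A (Python) =====
-- def maxSumOfSquares(num: int, sum: int) -> str:
--     num_str = []
--     for i in range(num):
--         if sum >= 9:
--             num_str.append('9')
--             sum -= 9
--         elif sum > 0:
--             num_str.append(str(sum))
--             sum = 0
--         else:
--             num_str.append('0')
--
--     return ''.join(num_str) if sum == 0 else ''
-- ===== SOURCE B (Python) =====
-- def maxSumOfSquares(num: int, sum: int) -> str: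
--     # Closed form: q nines, one digit r = sum % 9 (if nonzero), zeros for the rest.
--     if sum < 0 or sum > 9 * num:
--         return ''
--     q, r = divmod(sum, 9)
--     return '9' * q + (str(r) if r else '') + '0' * (num - q - (1 if r else 0))
-- ===== Notes on version B (the rewrite author's own statement) =====
-- stated objective: simpler
-- what changed: Replaces the length-num greedy digit loop with a single closed-form construction '9'*q + digit + '0'*rest from divmod(sum, 9), after rejecting impossible (num, sum) pairs up front.
import Mathlib
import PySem

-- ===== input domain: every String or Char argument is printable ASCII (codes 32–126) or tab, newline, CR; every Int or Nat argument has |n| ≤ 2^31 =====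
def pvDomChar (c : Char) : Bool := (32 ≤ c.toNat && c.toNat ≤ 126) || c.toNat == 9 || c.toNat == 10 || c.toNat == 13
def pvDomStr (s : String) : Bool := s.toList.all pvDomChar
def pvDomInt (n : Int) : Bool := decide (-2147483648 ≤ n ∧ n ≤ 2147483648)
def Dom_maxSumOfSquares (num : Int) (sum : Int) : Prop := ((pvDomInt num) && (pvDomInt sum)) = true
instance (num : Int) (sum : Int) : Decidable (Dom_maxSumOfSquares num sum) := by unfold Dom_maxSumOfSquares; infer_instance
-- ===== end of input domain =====

-- B replaces A's length-num greedy loop with a closed-form '9'*q + digit + '0'*rest construction (objective: simpler).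

-- ===== PORT A =====
-- the 'for i in range(num)' loop over the state (num_str, sum); range(num) is empty for num ≤ 0, hence num.toNat iterations
def loopA : Nat → List String → Int → (List String × Int)
  | 0, acc, s => (acc, s)
  | n+1, acc, s =>
    if 9 ≤ s then loopA n (acc ++ ["9"]) (s - 9)
    else if 0 < s then loopA n (acc ++ [PySem.Int.toStr s]) 0
    else loopA n (acc ++ ["0"]) s

def maxSumOfSquares (num : Int) (sum : Int) : String :=
  if (loopA num.toNat [] sum).2 = 0 then String.join (loopA num.toNat [] sum).1 else ""

-- ===== PORT B =====
def maxSumOfSquares_alt (num : Int) (sum : Int) : String :=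
  if sum < 0 ∨ 9 * num < sum then ""
  else
    let q := PySem.Int.floordiv sum 9
    let r := PySem.Int.mod sum 9
    -- '9'*q etc.: Python string repetition clamps a negative count to empty, as does .toNat
    String.ofList (List.replicate q.toNat '9')
      ++ (if r ≠ 0 then PySem.Int.toStr r else "")
      ++ String.ofList (List.replicate (num - q - (if r ≠ 0 then 1 else 0)).toNat '0')

-- ===== PRECONDITION & SPEC =====
def Spec_maxSumOfSquares (num : Int) (sum : Int) (out : String) : Prop := out = maxSumOfSquares_alt num sum
instance (num : Int) (sum : Int) (out : String) : Decidable (Spec_maxSumOfSquares num sum out) := by unfold Spec_maxSumOfSquares; infer_instance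

-- ===== CLAIM (what is proved, stated in full; the proofs are below) =====
def Claim_equal_maxSumOfSquares : Prop := ∀ (num : Int) (sum : Int), Dom_maxSumOfSquares num sum → Spec_maxSumOfSquares num sum (maxSumOfSquares num sum)

-- ===== LEMMAS AND PROOFS =====

theorem loopA_nonpos (n : Nat) (acc : List String) (s : Int) (hs : s ≤ 0) :
    loopA n acc s = (acc ++ List.replicate n "0", s) := by
  induction n generalizing acc with
  | zero => simp [loopA]
  | succ n ih =>
    rw [loopA, if_neg (by omega), if_neg (by omega), ih]
    simp [List.replicate_succ]

theorem loopA_big (n : Nat) (acc : List String) (s : Int) (hs : 9 * (n : Int) < s) :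
    (loopA n acc s).2 = s - 9 * n := by
  induction n generalizing acc s with
  | zero => simp [loopA]
  | succ n ih =>
    rw [loopA, if_pos (by push_cast at hs ⊢; omega)]
    rw [ih _ _ (by push_cast at hs ⊢; omega)]
    push_cast; ring

theorem join_foldl_init (xs : List String) (a : String) :
    xs.foldl (· ++ ·) a = a ++ xs.foldl (· ++ ·) "" := by
  induction xs generalizing a with
  | nil => simp
  | cons x xs ih =>
    simp only [List.foldl]
    rw [ih (a ++ x), ih ("" ++ x)]
    simp [String.append_assoc]

theorem join_append' (a b : List String) :
    String.join (a ++ b) = String.join a ++ String.join b := by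
  simp only [String.join, List.foldl_append]
  rw [join_foldl_init]

theorem join_replicate (n : Nat) (c : Char) :
    String.join (List.replicate n (String.ofList [c])) = String.ofList (List.replicate n c) := by
  induction n with
  | zero => simp [String.join]
  | succ n ih =>
    rw [List.replicate_succ, List.replicate_succ,
        show String.ofList [c] :: List.replicate n (String.ofList [c])
          = [String.ofList [c]] ++ List.replicate n (String.ofList [c]) from rfl,
        join_append', ih]
    rw [show String.join [String.ofList [c]] = String.ofList [c] by simp [String.join]]
    rw [show (c :: List.replicate n c) = [c] ++ List.replicate n c from rfl]
    exact String.ofList_append.symm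

theorem loopA_main (n : Nat) (s : Int) (acc : List String)
    (h0 : 0 ≤ s) (h1 : s ≤ 9 * (n : Int)) :
    loopA n acc s =
      (acc ++ List.replicate (PySem.Int.floordiv s 9).toNat "9"
        ++ (if PySem.Int.mod s 9 ≠ 0 then [PySem.Int.toStr (PySem.Int.mod s 9)] else [])
        ++ List.replicate ((n : Int) - PySem.Int.floordiv s 9
            - (if PySem.Int.mod s 9 ≠ 0 then 1 else 0)).toNat "0", 0) := by
  induction n generalizing s acc with
  | zero =>
    have hs0 : s = 0 := by push_cast at h1; omega
    subst hs0
    simp [loopA, PySem.Int.floordiv, PySem.Int.mod]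
  | succ n ih =>
    rw [PySem.Int.floordiv_eq_ediv_of_pos (by norm_num),
        PySem.Int.mod_eq_emod_of_pos (by norm_num)]
    by_cases h9 : 9 ≤ s
    · rw [loopA, if_pos h9, ih (s - 9) _ (by omega) (by push_cast at h1 ⊢; omega)]
      rw [PySem.Int.floordiv_eq_ediv_of_pos (by norm_num),
          PySem.Int.mod_eq_emod_of_pos (by norm_num)]
      have hm : (s - 9) % 9 = s % 9 := by omega
      have hrep : (s / 9).toNat = ((s - 9) / 9).toNat + 1 := by omega
      rw [hm, hrep, List.replicate_succ]
      have hcnt : (((n + 1 : Nat) : Int) - s / 9 - (if s % 9 ≠ 0 then 1 else 0)).toNat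
          = ((n : Int) - (s - 9) / 9 - (if s % 9 ≠ 0 then 1 else 0)).toNat := by
        split_ifs <;> push_cast <;> omega
      rw [hcnt]
      simp
    · by_cases hp : 0 < s
      · rw [loopA, if_neg h9, if_pos hp, loopA_nonpos n _ 0 le_rfl]
        have hq : s / 9 = 0 := by omega
        have hm : s % 9 = s := by omega
        rw [hq, hm]
        simp [hp.ne']
      · have hs0 : s = 0 := by omega
        subst hs0
        rw [loopA, if_neg (by norm_num), if_neg (by norm_num), loopA_nonpos n _ 0 le_rfl]
        have hz : (((n + 1 : Nat) : Int) - 0 / 9 - (if (0:Int) % 9 ≠ 0 then 1 else 0)).toNat = n + 1 := by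
          norm_num
        rw [hz]
        norm_num [List.replicate_succ]

-- ===== VERDICT (by name: the statement is the Claim_ definition above) =====
theorem maxSumOfSquares_spec : Claim_equal_maxSumOfSquares := by
  intro num sum _
  unfold Spec_maxSumOfSquares maxSumOfSquares maxSumOfSquares_alt
  by_cases hneg : sum < 0
  · rw [if_pos (Or.inl hneg)]
    rw [loopA_nonpos _ _ _ hneg.le]
    simp [hneg.ne]
  · rw [not_lt] at hneg
    by_cases hbig : 9 * num < sum
    · rw [if_pos (Or.inr hbig)]
      by_cases hnum : num < 0
      · rw [show num.toNat = 0 by omega]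
        by_cases hz : sum = 0
        · subst hz; simp [loopA, String.join]
        · simp [loopA, hz]
      · rw [not_lt] at hnum
        have hlt : 9 * ((num.toNat : Nat) : Int) < sum := by
          rw [show ((num.toNat : Nat) : Int) = num by omega]; exact hbig
        have h2 := loopA_big num.toNat [] sum hlt
        rw [if_neg (show ¬((loopA num.toNat [] sum).2 = 0) from by rw [h2]; omega)]
    · rw [not_lt] at hbig
      have hnum : 0 ≤ num := by nlinarith
      rw [if_neg (show ¬(sum < 0 ∨ 9 * num < sum) from by rw [not_or]; exact ⟨not_lt.mpr hneg, not_lt.mpr hbig⟩)]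
      have hcast : ((num.toNat : Nat) : Int) = num := by omega
      rw [loopA_main num.toNat sum [] hneg (by rw [hcast]; exact hbig)]
      rw [if_pos rfl, hcast]
      simp only [List.nil_append]
      rw [join_append', join_append']
      congr 1
      · congr 1
        · exact join_replicate _ '9'
        · split_ifs with h
          · simp [String.join]
          · simp [String.join]
      · exact join_replicate _ '0'
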